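-- pv_equiv track=rewrite | github.com/d1ssmuss/Codewars-2025 | Python/7 kyu Well of Ideas - Harder Version.py | well
-- ===== SOURCE A (Python) =====
-- def well(arr):
--     combined_list = []
--     for i in range(len(arr)):
--         combined_list += [str(arr[i][j]) for j in range(len(arr[i]))]
--     # return list(map(str.lower, combined_list))
--     if 1 <= list(map(str.lower, combined_list)).count("good") <= 2:
--         return "Publish!"
--     elif list(map(str.lower, combined_list)).count("good") > 2:
--         return 'I smell a series!'
--     else:
--         return "Fail!"
-- ===== SOURCE B (Python) =====
-- def well(arr):
--     # Early-exit saturating scan: the verdict for 3+ goods is decided the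
--     # moment the third "good" is seen; no full count, no threshold chain.
--     k = 0
--     for sub in arr:
--         for x in sub:
--             if str(x).lower() == "good":
--                 k += 1
--                 if k == 3:
--                     return "I smell a series!"
--     return "Publish!" if k else "Fail!"
-- ===== Notes on version B (the rewrite author's own statement) =====
-- stated objective: faster
-- what changed: B is an early-exit saturating scan that returns 'I smell a series!' the moment the third 'good' is found and never builds A's flattened list nor its two map-lower-and-count passes; the verdict for <3 goods comes from the saturated counter.
import Mathlib
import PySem

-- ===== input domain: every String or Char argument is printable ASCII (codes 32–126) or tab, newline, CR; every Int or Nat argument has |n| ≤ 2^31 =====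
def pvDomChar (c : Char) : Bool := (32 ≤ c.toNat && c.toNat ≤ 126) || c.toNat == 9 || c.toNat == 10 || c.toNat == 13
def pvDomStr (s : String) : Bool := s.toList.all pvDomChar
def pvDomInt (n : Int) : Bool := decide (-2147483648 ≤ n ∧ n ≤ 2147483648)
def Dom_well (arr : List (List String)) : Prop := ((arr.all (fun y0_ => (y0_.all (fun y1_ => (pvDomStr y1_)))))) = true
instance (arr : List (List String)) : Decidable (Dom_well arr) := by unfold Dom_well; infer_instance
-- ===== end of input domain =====

-- B replaces A's flatten-then-count-twice with an early-exit saturating scan that returns the verdict at the third "good" (alternative decomposition, same worst-case cost).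


-- ===== PORT A =====
-- combined_list built by indexing with range(len(...)); str(x) on a str is the identity
def well (arr : List (List String)) : String :=
  let combined : List String :=
    (PySem.List.pyRange 0 arr.length 1).foldl
      (fun acc i =>
        acc ++ (PySem.List.pyRange 0 (PySem.List.pyGetD arr i []).length 1).map
          (fun j => PySem.List.pyGetD (PySem.List.pyGetD arr i []) j ""))
      []
  if 1 ≤ ((combined.map PySem.Str.lower).count "good" : Int) ∧
     ((combined.map PySem.Str.lower).count "good" : Int) ≤ 2 then "Publish!"
  else if ((combined.map PySem.Str.lower).count "good" : Int) > 2 then "I smell a series!"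
  else "Fail!"

-- ===== PORT B =====
-- inner loop: none = early exit (third "good" seen), some k = counter after the sub-array
def wellAltSub : List String → Nat → Option Nat
  | [], k => some k
  | x :: xs, k =>
    if PySem.Str.lower x = "good" then
      (if k + 1 = 3 then none else wellAltSub xs (k + 1))
    else wellAltSub xs k

def wellAltMain : List (List String) → Nat → Option Nat
  | [], k => some k
  | s :: rest, k =>
    match wellAltSub s k with
    | none => none
    | some k' => wellAltMain rest k'

def well_alt (arr : List (List String)) : String :=
  match wellAltMain arr 0 with
  | none => "I smell a series!"
  | some k => if k ≠ 0 then "Publish!" else "Fail!"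

-- ===== PRECONDITION & SPEC =====
def Spec_well (arr : List (List String)) (out : String) : Prop := out = well_alt arr
instance (arr : List (List String)) (out : String) : Decidable (Spec_well arr out) := by unfold Spec_well; infer_instance

-- ===== CLAIM (what is proved, stated in full; the proofs are below) =====
def Claim_equal_well : Prop := ∀ (arr : List (List String)), Dom_well arr → Spec_well arr (well arr)

-- ===== LEMMAS AND PROOFS =====

-- A's combined list is just arr.flatten
theorem well_combined_eq (arr : List (List String)) :
    (PySem.List.pyRange 0 arr.length 1).foldl
      (fun acc i =>
        acc ++ (PySem.List.pyRange 0 (PySem.List.pyGetD arr i []).length 1).map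
          (fun j => PySem.List.pyGetD (PySem.List.pyGetD arr i []) j ""))
      [] = arr.flatten := by
  simp only [PySem.List.map_pyGetD_pyRange_zero', PySem.List.foldl_pyRange_zero_pyGetD'
    (f := fun (acc sub : List String) => acc ++ sub) (d := ([] : List String))]
  have h : ∀ (l : List (List String)) (acc : List String),
      l.foldl (fun acc sub => acc ++ sub) acc = acc ++ l.flatten := by
    intro l
    induction l with
    | nil => simp
    | cons s r ih => intro acc; simp [ih]
  simp [h]

theorem wellAltSub_eq (sub : List String) (k : Nat) (hk : k < 3) :
    wellAltSub sub k =
      if k + (sub.map PySem.Str.lower).count "good" < 3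
      then some (k + (sub.map PySem.Str.lower).count "good") else none := by
  induction sub generalizing k with
  | nil => simp [wellAltSub, hk]
  | cons x xs ih =>
    simp only [wellAltSub, List.map_cons, List.count_cons]
    by_cases hx : PySem.Str.lower x = "good"
    · rw [if_pos hx]
      have hc : (if PySem.Str.lower x == ("good" : String) then 1 else 0) = 1 := by
        simp [hx]
      rw [hc]
      by_cases h3 : k + 1 = 3
      · rw [if_pos h3, if_neg (show ¬ (k + ((xs.map PySem.Str.lower).count "good" + 1) < 3) by omega)]
      · rw [if_neg h3, ih (k + 1) (by omega)]
        have e : k + 1 + (xs.map PySem.Str.lower).count "good"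
               = k + ((xs.map PySem.Str.lower).count "good" + 1) := by omega
        rw [e]
    · rw [if_neg hx]
      have hc : (if PySem.Str.lower x == ("good" : String) then 1 else 0) = 0 := by
        simp [hx]
      rw [hc, ih k hk, Nat.add_zero]

theorem wellAltMain_eq (arr : List (List String)) (k : Nat) (hk : k < 3) :
    wellAltMain arr k =
      if k + (arr.flatten.map PySem.Str.lower).count "good" < 3
      then some (k + (arr.flatten.map PySem.Str.lower).count "good") else none := by
  induction arr generalizing k with
  | nil => simp [wellAltMain, hk]
  | cons s rest ih =>
    simp only [wellAltMain, wellAltSub_eq s k hk, List.flatten_cons, List.map_append,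
      List.count_append]
    by_cases h : k + (s.map PySem.Str.lower).count "good" < 3
    · rw [if_pos h]
      show wellAltMain rest (k + (s.map PySem.Str.lower).count "good") = _
      rw [ih _ h]
      have e : k + (s.map PySem.Str.lower).count "good" + (rest.flatten.map PySem.Str.lower).count "good"
             = k + ((s.map PySem.Str.lower).count "good" + (rest.flatten.map PySem.Str.lower).count "good") := by
        omega
      rw [e]
    · rw [if_neg h]
      show (none : Option Nat) = _
      rw [if_neg (show ¬ (k + ((s.map PySem.Str.lower).count "good" + (rest.flatten.map PySem.Str.lower).count "good") < 3) by omega)]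

-- ===== VERDICT (by name: the statement is the Claim_ definition above) =====
theorem well_spec : Claim_equal_well := by
  intro arr _
  unfold Spec_well well well_alt
  simp only [well_combined_eq]
  rw [wellAltMain_eq arr 0 (by omega), Nat.zero_add]
  set t := (arr.flatten.map PySem.Str.lower).count "good" with ht
  by_cases h3 : t < 3
  · rw [if_pos h3]
    by_cases h0 : t = 0
    · rw [if_neg (show ¬ (1 ≤ (t : Int) ∧ (t : Int) ≤ 2) by omega),
          if_neg (show ¬ ((t : Int) > 2) by omega)]
      simp [h0]
    · rw [if_pos (show 1 ≤ (t : Int) ∧ (t : Int) ≤ 2 by omega)]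
      simp [h0]
  · rw [if_neg (show ¬ (1 ≤ (t : Int) ∧ (t : Int) ≤ 2) by omega),
        if_pos (show (t : Int) > 2 by omega), if_neg h3]
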